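-- pv_equiv track=rewrite | github.com/anglil/EffectiveCrowd | code_get_data_split/old_code/data_preparation.py | getGoldLabel
-- ===== SOURCE A (Python) =====
-- def getGoldLabel(tmp):
-- 	# -1: optional
-- 	# 0: no
-- 	# 1: yes
-- 	goldLabel = {
-- 		'r1': "optional",
-- 		'r2': "optional",
-- 		'r3': "optional",
-- 		'r4': "optional",
-- 		'r5': "optional"
-- 	}
-- 	afterNot = False
-- 	for item in tmp:
-- 		if item == 'not:':
-- 			afterNot = True
-- 		elif item != '':
-- 			if afterNot == False:
-- 				goldLabel[num_to_key[item]] = num_to_relation[item]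
-- 			else:
-- 				goldLabel[num_to_key[item]] = num_to_relation[item] + " neg"
-- 	return goldLabel
--
-- num_to_key = {
-- 	'0': 'r1',
-- 	'1': 'r2',
-- 	'2': 'r3',
-- 	'3': 'r4',
-- 	'4': 'r5'
-- }
--
-- num_to_relation = {
-- 	'0': "has nationality",
-- 	'1': "was born in",
-- 	'2': "lived in",
-- 	'3': "died in",
-- 	'4': "traveled to"
-- }
-- ===== SOURCE B (Python) =====
-- num_to_key = {
-- 	'0': 'r1',
-- 	'1': 'r2',
-- 	'2': 'r3',
-- 	'3': 'r4',
-- 	'4': 'r5'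
-- }
--
-- num_to_relation = {
-- 	'0': "has nationality",
-- 	'1': "was born in",
-- 	'2': "lived in",
-- 	'3': "died in",
-- 	'4': "traveled to"
-- }
--
-- def getGoldLabel(tmp):
-- 	goldLabel = {
-- 		'r1': "optional",
-- 		'r2': "optional",
-- 		'r3': "optional",
-- 		'r4': "optional",
-- 		'r5': "optional"
-- 	}
-- 	# locate the first 'not:' (everything before it is positive, after it negated)
-- 	idx = tmp.index('not:') if 'not:' in tmp else len(tmp)
-- 	for item in tmp[:idx]:
-- 		if item != '':
-- 			goldLabel[num_to_key[item]] = num_to_relation[item]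
-- 	for item in tmp[idx + 1:]:
-- 		if item != '' and item != 'not:':
-- 			goldLabel[num_to_key[item]] = num_to_relation[item] + " neg"
-- 	return goldLabel
-- ===== Notes on version B (the rewrite author's own statement) =====
-- stated objective: alternative
-- what changed: Instead of one pass threading an afterNot boolean through every iteration, B first locates the first 'not:' with list.index and then runs two plain loops, one over the head slice (positive labels) and one over the tail slice (negated labels).
import Mathlib
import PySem

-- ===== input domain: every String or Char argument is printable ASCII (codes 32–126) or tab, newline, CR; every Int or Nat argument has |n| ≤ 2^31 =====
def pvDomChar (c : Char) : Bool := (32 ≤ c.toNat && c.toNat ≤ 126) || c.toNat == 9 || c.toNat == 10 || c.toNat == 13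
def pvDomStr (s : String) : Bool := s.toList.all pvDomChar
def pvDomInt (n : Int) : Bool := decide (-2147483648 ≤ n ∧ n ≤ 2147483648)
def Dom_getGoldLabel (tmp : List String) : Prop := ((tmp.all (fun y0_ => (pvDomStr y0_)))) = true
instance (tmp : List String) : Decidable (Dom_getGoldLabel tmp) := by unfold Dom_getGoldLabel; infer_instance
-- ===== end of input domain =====

-- B replaces A's single pass threading an afterNot flag by locating the first 'not:' and
-- running two plain loops over the head and tail slices (objective: alternative decomposition).


-- ===== PORT A =====
-- module-level dicts (shared context of both versions)
def pvNumToKey : PySem.Dict String String :=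
  PySem.Dict.ofList [("0", "r1"), ("1", "r2"), ("2", "r3"), ("3", "r4"), ("4", "r5")]
def pvNumToRel : PySem.Dict String String :=
  PySem.Dict.ofList [("0", "has nationality"), ("1", "was born in"), ("2", "lived in"), ("3", "died in"), ("4", "traveled to")]
-- the initial goldLabel dict of defaults
def pvGoldInit : PySem.Dict String String :=
  PySem.Dict.ofList [("r1", "optional"), ("r2", "optional"), ("r3", "optional"), ("r4", "optional"), ("r5", "optional")]

-- A's loop body: state = (goldLabel, afterNot). Python's raising dict lookup num_to_key[item]
-- is rendered as getD with a dummy default; Pre_ excludes the inputs where it would raise.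
def pvStepA (st : PySem.Dict String String × Bool) (item : String) : PySem.Dict String String × Bool :=
  if item = "not:" then (st.1, true)
  else if item ≠ "" then
    if st.2 = false then
      (PySem.Dict.insert st.1 (PySem.Dict.getD pvNumToKey item "") (PySem.Dict.getD pvNumToRel item ""), st.2)
    else
      (PySem.Dict.insert st.1 (PySem.Dict.getD pvNumToKey item "") (PySem.Dict.getD pvNumToRel item "" ++ " neg"), st.2)
  else st

def getGoldLabel (tmp : List String) : List (String × String) :=
  (tmp.foldl pvStepA (pvGoldInit, false)).1.items

-- ===== PORT B =====
-- index of the first 'not:' (or the length): B's `tmp.index('not:') if 'not:' in tmp else len(tmp)`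
def pvIdx (l : List String) : Nat :=
  match PySem.List.index? l "not:" with
  | some i => i
  | none => l.length

-- B's first loop: positive labels from the head slice
def pvHeadLoop (g : PySem.Dict String String) (l : List String) : PySem.Dict String String :=
  l.foldl (fun g item =>
    if item ≠ "" then
      PySem.Dict.insert g (PySem.Dict.getD pvNumToKey item "") (PySem.Dict.getD pvNumToRel item "")
    else g) g

-- B's second loop: negated labels from the tail slice
def pvTailLoop (g : PySem.Dict String String) (l : List String) : PySem.Dict String String :=
  l.foldl (fun g item =>
    if item ≠ "" ∧ item ≠ "not:" then
      PySem.Dict.insert g (PySem.Dict.getD pvNumToKey item "") (PySem.Dict.getD pvNumToRel item "" ++ " neg")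
    else g) g

def getGoldLabel_alt (tmp : List String) : List (String × String) :=
  (pvTailLoop (pvHeadLoop pvGoldInit (PySem.List.slice tmp none (some (pvIdx tmp : Int))))
             (PySem.List.slice tmp (some ((pvIdx tmp : Int) + 1)) none)).items

-- ===== PRECONDITION & SPEC =====
-- Pre_ excludes exactly the inputs on which Python A raises KeyError: any token other than
-- '', 'not:' and the relation codes '0'..'4' is looked up in num_to_key and raises.
def Pre_getGoldLabel (tmp : List String) : Prop :=
  ∀ s ∈ tmp, s = "" ∨ s = "not:" ∨ s = "0" ∨ s = "1" ∨ s = "2" ∨ s = "3" ∨ s = "4"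
instance (tmp : List String) : Decidable (Pre_getGoldLabel tmp) := by unfold Pre_getGoldLabel; infer_instance
def pvWitness_getGoldLabel : List String := ["0", "not:", "3", ""]

def Spec_getGoldLabel (tmp : List String) (out : List (String × String)) : Prop := out = getGoldLabel_alt tmp
instance (tmp : List String) (out : List (String × String)) : Decidable (Spec_getGoldLabel tmp out) := by unfold Spec_getGoldLabel; infer_instance

-- ===== CLAIM (what is proved, stated in full; the proofs are below) =====
def Claim_equal_getGoldLabel : Prop := ∀ (tmp : List String), Dom_getGoldLabel tmp → Pre_getGoldLabel tmp → Spec_getGoldLabel tmp (getGoldLabel tmp)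

-- ===== LEMMAS AND PROOFS =====

lemma pvIdx_cons_self (xs : List String) : pvIdx ("not:" :: xs) = 0 := by
  simp [pvIdx, PySem.List.index?, List.idxOf?_cons]

lemma pvIdx_cons_ne (x : String) (xs : List String) (h : x ≠ "not:") :
    pvIdx (x :: xs) = pvIdx xs + 1 := by
  cases hi : List.idxOf? "not:" xs <;>
    simp [pvIdx, PySem.List.index?, List.idxOf?_cons, h, hi]

lemma alt_eq_takeDrop (tmp : List String) :
    getGoldLabel_alt tmp
      = (pvTailLoop (pvHeadLoop pvGoldInit (tmp.take (pvIdx tmp))) (tmp.drop (pvIdx tmp + 1))).items := by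
  unfold getGoldLabel_alt
  rw [PySem.List.slice_to tmp (by positivity), PySem.List.slice_from tmp (by positivity)]
  have h1 : ((pvIdx tmp : Int)).toNat = pvIdx tmp := by simp
  have h2 : ((pvIdx tmp : Int) + 1).toNat = pvIdx tmp + 1 := by omega
  rw [h1, h2]

-- once afterNot is true, A's remaining pass computes exactly B's tail loop
lemma foldA_true (l : List String) (g : PySem.Dict String String) :
    (l.foldl pvStepA (g, true)).1 = pvTailLoop g l := by
  induction l generalizing g with
  | nil => simp [pvTailLoop]
  | cons x xs ih =>
    by_cases hx : x = "not:"
    · subst hx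
      simp [List.foldl_cons, pvStepA, pvTailLoop, ih]
    · by_cases he : x = ""
      · subst he
        simp [List.foldl_cons, pvStepA, pvTailLoop, ih]
      · simp [List.foldl_cons, pvStepA, pvTailLoop, hx, he, ih]

-- A's pass started with afterNot = false computes B's head-then-tail decomposition
lemma foldA_false (l : List String) (g : PySem.Dict String String) :
    (l.foldl pvStepA (g, false)).1
      = pvTailLoop (pvHeadLoop g (l.take (pvIdx l))) (l.drop (pvIdx l + 1)) := by
  induction l generalizing g with
  | nil => simp [pvIdx, PySem.List.index?, pvHeadLoop, pvTailLoop]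
  | cons x xs ih =>
    by_cases hx : x = "not:"
    · subst hx
      rw [pvIdx_cons_self]
      simp only [List.take_zero, List.drop_succ_cons, List.drop_zero, List.foldl_cons]
      have : pvStepA (g, false) "not:" = (g, true) := by simp [pvStepA]
      rw [this, foldA_true]
      rfl
    · rw [pvIdx_cons_ne x xs hx]
      simp only [List.take_succ_cons, List.drop_succ_cons, List.foldl_cons]
      by_cases he : x = ""
      · subst he
        have : pvStepA (g, false) "" = (g, false) := by simp [pvStepA]
        rw [this, ih]
        simp [pvHeadLoop]
      · have : pvStepA (g, false) x
            = (PySem.Dict.insert g (PySem.Dict.getD pvNumToKey x "") (PySem.Dict.getD pvNumToRel x ""), false) := by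
          simp [pvStepA, hx, he]
        rw [this, ih]
        simp [pvHeadLoop, he]

-- ===== VERDICT (by name: the statement is the Claim_ definition above) =====
theorem getGoldLabel_spec : Claim_equal_getGoldLabel := by
  intro tmp _ _
  show getGoldLabel tmp = getGoldLabel_alt tmp
  rw [alt_eq_takeDrop]
  unfold getGoldLabel
  rw [foldA_false tmp pvGoldInit]
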